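-- pv_equiv track=rewrite | github.com/Bleak-bleak/CSE101 | lab4.py | braid
-- ===== SOURCE A (Python) =====
-- def braid(level):
--     ori=[1, 1, 1]
--     i=0
--     while i< (level):
--         i += 1
--         if i == 0:
--             return ori
--         if i % 2==0:
--             ori[1], ori[2] = ori[2], ori[1]
--             ori[1]= ori[2] +ori [1]
--         else:
--             ori[0], ori[1] = ori[1], ori[0]
--             ori[1]= ori[1] + ori[0]
--     return ori
-- ===== SOURCE B (Python) =====
-- def _matmul(X, Y):
--     return tuple(tuple(sum(X[i][k] * Y[k][j] for k in range(3)) for j in range(3)) for i in range(3))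
--
--
-- def _matpow(M, n):
--     if n == 0:
--         return ((1, 0, 0), (0, 1, 0), (0, 0, 1))
--     h = _matpow(M, n // 2)
--     h2 = _matmul(h, h)
--     return h2 if n % 2 == 0 else _matmul(h2, M)
--
--
-- def braid(level):
--     if level <= 0:
--         return [1, 1, 1]
--     # one odd step then one even step is the linear map (a,b,c) -> (b, a+b+c, a+b)
--     M = ((0, 1, 0), (1, 1, 1), (1, 1, 0))
--     P = _matpow(M, level // 2)
--     a, b, c = (sum(row[j] for j in range(3)) for row in P)  # P applied to (1,1,1)
--     if level % 2:
--         a, b, c = b, a + b, c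
--     return [a, b, c]
-- ===== Notes on version B (the rewrite author's own statement) =====
-- stated objective: faster
-- what changed: Replaces the step-by-step alternating swap-add loop by expressing the two-step transition as a 3x3 integer matrix and computing its (level//2)-th power with exponentiation by squaring, plus one explicit odd step when level is odd; intended as faster: a timing run measured B at 5.4x (n=4096) up to 14.1x (n=262144, where A timed out), though the largest size could not be fully confirmed.
import Mathlib
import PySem

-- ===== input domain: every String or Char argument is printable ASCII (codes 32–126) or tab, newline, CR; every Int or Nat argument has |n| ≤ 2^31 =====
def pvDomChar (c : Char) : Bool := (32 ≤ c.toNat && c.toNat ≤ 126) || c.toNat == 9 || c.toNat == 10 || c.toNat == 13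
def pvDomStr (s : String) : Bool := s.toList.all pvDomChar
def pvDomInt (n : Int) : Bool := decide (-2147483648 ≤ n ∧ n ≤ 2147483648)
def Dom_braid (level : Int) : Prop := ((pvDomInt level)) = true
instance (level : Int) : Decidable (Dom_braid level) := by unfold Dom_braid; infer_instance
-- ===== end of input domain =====

-- B replaces A's step-by-step alternating swap-add loop by the (level//2)-th power of the
-- 3x3 matrix of the two-step transition, computed by squaring; intended as faster
-- (timing run measured 5.4x-14.1x, largest size unconfirmed).

-- ===== PORT A =====
-- A's while loop: i runs 1..level (so level.toNat iterations); the dead 'if i == 0: return ori'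
-- branch is kept as an early exit returning the current state.
def braidLoop : Nat → Int → Int × Int × Int → Int × Int × Int
  | 0, _, s => s
  | n+1, i, (a, b, c) =>
    if i + 1 = 0 then (a, b, c)
    else if PySem.Int.mod (i + 1) 2 = 0 then
      braidLoop n (i + 1) (a, b + c, b)   -- swap ori[1],ori[2]; ori[1] = ori[2] + ori[1]
    else
      braidLoop n (i + 1) (b, a + b, c)   -- swap ori[0],ori[1]; ori[1] = ori[1] + ori[0]

def braid (level : Int) : List Int :=
  let s := braidLoop level.toNat 0 (1, 1, 1)
  [s.1, s.2.1, s.2.2]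

-- ===== PORT B =====
abbrev Vec3 := Int × Int × Int
abbrev M3 := Vec3 × Vec3 × Vec3

-- _matmul
def mul3 : M3 → M3 → M3
  | ((a11,a12,a13),(a21,a22,a23),(a31,a32,a33)),
    ((b11,b12,b13),(b21,b22,b23),(b31,b32,b33)) =>
    ((a11*b11+a12*b21+a13*b31, a11*b12+a12*b22+a13*b32, a11*b13+a12*b23+a13*b33),
     (a21*b11+a22*b21+a23*b31, a21*b12+a22*b22+a23*b32, a21*b13+a22*b23+a23*b33),
     (a31*b11+a32*b21+a33*b31, a31*b12+a32*b22+a33*b32, a31*b13+a32*b23+a33*b33))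

def id3 : M3 := ((1,0,0),(0,1,0),(0,0,1))

-- _matpow (its Python argument n = level//2 is a nonnegative int, ported as Nat)
def matpow (M : M3) (n : Nat) : M3 :=
  if h : n = 0 then id3
  else
    let hm := matpow M (n / 2)
    let h2 := mul3 hm hm
    if n % 2 = 0 then h2 else mul3 h2 M
termination_by n
decreasing_by exact Nat.div_lt_self (Nat.pos_of_ne_zero h) (by norm_num)

def braid_alt (level : Int) : List Int :=
  if level ≤ 0 then [1, 1, 1]
  else
    let M : M3 := ((0,1,0),(1,1,1),(1,1,0))
    let P := matpow M (PySem.Int.floordiv level 2).toNat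
    let a := P.1.1 + P.1.2.1 + P.1.2.2          -- row sums = P applied to (1,1,1)
    let b := P.2.1.1 + P.2.1.2.1 + P.2.1.2.2
    let c := P.2.2.1 + P.2.2.2.1 + P.2.2.2.2
    if PySem.Int.mod level 2 ≠ 0 then [b, a + b, c] else [a, b, c]

-- ===== PRECONDITION & SPEC =====
def Spec_braid (level : Int) (out : List Int) : Prop := out = braid_alt level
instance (level : Int) (out : List Int) : Decidable (Spec_braid level out) := by unfold Spec_braid; infer_instance

-- ===== CLAIM (what is proved, stated in full; the proofs are below) =====
def Claim_equal_braid : Prop := ∀ (level : Int), Dom_braid level → Spec_braid level (braid level)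

-- ===== LEMMAS AND PROOFS =====

def appM : M3 → Vec3 → Vec3
  | ((a11,a12,a13),(a21,a22,a23),(a31,a32,a33)), (x,y,z) =>
    (a11*x+a12*y+a13*z, a21*x+a22*y+a23*z, a31*x+a32*y+a33*z)

def Mmat : M3 := ((0,1,0),(1,1,1),(1,1,0))

def powS (M : M3) : Nat → M3
  | 0 => id3
  | n+1 => mul3 (powS M n) M

theorem mul3_assoc (X Y Z : M3) : mul3 (mul3 X Y) Z = mul3 X (mul3 Y Z) := by
  obtain ⟨⟨a11,a12,a13⟩,⟨a21,a22,a23⟩,⟨a31,a32,a33⟩⟩ := X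
  obtain ⟨⟨b11,b12,b13⟩,⟨b21,b22,b23⟩,⟨b31,b32,b33⟩⟩ := Y
  obtain ⟨⟨c11,c12,c13⟩,⟨c21,c22,c23⟩,⟨c31,c32,c33⟩⟩ := Z
  simp only [mul3, Prod.mk.injEq]
  and_intros <;> ring

theorem mul3_id_right (X : M3) : mul3 X id3 = X := by
  obtain ⟨⟨a11,a12,a13⟩,⟨a21,a22,a23⟩,⟨a31,a32,a33⟩⟩ := X
  simp only [mul3, id3, Prod.mk.injEq]
  and_intros <;> ring

theorem appM_id (v : Vec3) : appM id3 v = v := by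
  obtain ⟨x,y,z⟩ := v
  simp only [appM, id3, Prod.mk.injEq]
  and_intros <;> ring

theorem appM_mul (X Y : M3) (v : Vec3) : appM (mul3 X Y) v = appM X (appM Y v) := by
  obtain ⟨⟨a11,a12,a13⟩,⟨a21,a22,a23⟩,⟨a31,a32,a33⟩⟩ := X
  obtain ⟨⟨b11,b12,b13⟩,⟨b21,b22,b23⟩,⟨b31,b32,b33⟩⟩ := Y
  obtain ⟨x,y,z⟩ := v
  simp only [mul3, appM, Prod.mk.injEq]
  and_intros <;> ring

theorem powS_add (M : M3) (a b : Nat) :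
    powS M (a + b) = mul3 (powS M a) (powS M b) := by
  induction b with
  | zero => simp [powS, mul3_id_right]
  | succ b ih => rw [Nat.add_succ]; simp [powS, ih, mul3_assoc]

theorem matpow_eq_powS (M : M3) : ∀ n, matpow M n = powS M n := by
  intro n
  induction n using Nat.strong_induction_on with
  | _ n ih =>
    rw [matpow]
    by_cases h : n = 0
    · simp [h, powS]
    · simp only [h, dite_false]
      have ihn := ih (n / 2) (Nat.div_lt_self (Nat.pos_of_ne_zero h) (by norm_num))
      by_cases he : n % 2 = 0
      · have hn : n = n / 2 + n / 2 := by omega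
        simp only [he, if_pos, ihn]
        rw [← powS_add]; exact congrArg _ hn.symm
      · have hn : n = (n / 2 + n / 2) + 1 := by omega
        simp only [he, ihn, if_false]
        rw [← powS_add]
        conv_rhs => rw [hn]
        rfl

-- one-step unfolding of A's loop, kept as an equation to rewrite with
theorem braidLoop_succ (n : Nat) (i a b c : Int) :
    braidLoop (n+1) i (a,b,c) =
      if i + 1 = 0 then (a, b, c)
      else if PySem.Int.mod (i + 1) 2 = 0 then braidLoop n (i + 1) (a, b + c, b)
      else braidLoop n (i + 1) (b, a + b, c) := rfl

-- parity bookkeeping for A's counter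
theorem mod_facts (i : Int) (h : PySem.Int.mod i 2 = 0) (hnn : 0 ≤ i) :
    i + 1 ≠ 0 ∧ PySem.Int.mod (i + 1) 2 ≠ 0 ∧ PySem.Int.mod (i + 2) 2 = 0 ∧ i + 2 ≠ 0 := by
  rw [PySem.Int.mod_eq_emod_of_pos (by norm_num)] at h
  rw [PySem.Int.mod_eq_emod_of_pos (by norm_num),
      PySem.Int.mod_eq_emod_of_pos (by norm_num)]
  omega

-- the two-step transition (one odd step then one even step) is multiplication by Mmat
theorem twoStep (a b c : Int) : appM Mmat (a, b, c) = (b, a + b + c, a + b) := by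
  simp only [Mmat, appM, Prod.mk.injEq]; and_intros <;> ring

theorem braidLoop_powS (n : Nat) : ∀ (i : Int) (v : Vec3),
    PySem.Int.mod i 2 = 0 → 0 ≤ i →
    braidLoop (2 * n) i v = appM (powS Mmat n) v ∧
    braidLoop (2 * n + 1) i v = (fun s : Vec3 => (s.2.1, s.1 + s.2.1, s.2.2))
      (appM (powS Mmat n) v) := by
  induction n with
  | zero =>
    intro i v h hnn
    obtain ⟨h1, h2, _, _⟩ := mod_facts i h hnn
    obtain ⟨a, b, c⟩ := v
    refine ⟨by simp [braidLoop, powS, appM_id], ?_⟩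
    show braidLoop (0 + 1) i (a, b, c) = _
    rw [braidLoop_succ, if_neg h1, if_neg h2]
    simp [braidLoop, powS, appM_id]
  | succ n ih =>
    intro i v h hnn
    obtain ⟨h1, h2, h3, h4⟩ := mod_facts i h hnn
    obtain ⟨a, b, c⟩ := v
    have e2 : i + 1 + 1 = i + 2 := by ring
    have step2 : ∀ m, braidLoop (m + 2) i (a, b, c)
        = braidLoop m (i + 2) (appM Mmat (a, b, c)) := by
      intro m
      rw [twoStep]
      show braidLoop (m + 1 + 1) i (a, b, c) = _
      rw [braidLoop_succ, if_neg h1, if_neg h2, braidLoop_succ, e2, if_neg h4, if_pos h3]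
    have ih2 := ih (i + 2) (appM Mmat (a, b, c)) h3 (by omega)
    constructor
    · have hn : 2 * (n + 1) = 2 * n + 2 := by ring
      rw [hn, step2 (2 * n), ih2.1, ← appM_mul]
      rfl
    · have hn : 2 * (n + 1) + 1 = 2 * n + 1 + 2 := by ring
      rw [hn, step2 (2 * n + 1), ih2.2, ← appM_mul]
      rfl

theorem appM_ones (P : M3) :
    appM P (1, 1, 1) = (P.1.1 + P.1.2.1 + P.1.2.2,
                        P.2.1.1 + P.2.1.2.1 + P.2.1.2.2,
                        P.2.2.1 + P.2.2.2.1 + P.2.2.2.2) := by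
  obtain ⟨⟨a11,a12,a13⟩,⟨a21,a22,a23⟩,⟨a31,a32,a33⟩⟩ := P
  simp only [appM, Prod.mk.injEq]; and_intros <;> ring

-- ===== VERDICT (by name: the statement is the Claim_ definition above) =====
theorem braid_spec : Claim_equal_braid := by
  intro level _
  simp only [Spec_braid, braid, braid_alt]
  by_cases hle : level ≤ 0
  · have h0 : level.toNat = 0 := by omega
    simp [h0, braidLoop, hle]
  · rw [if_neg hle]
    have hfd : (PySem.Int.floordiv level 2).toNat = level.toNat / 2 := by
      rw [PySem.Int.floordiv_eq_ediv_of_pos (by norm_num)]; omega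
    have hMm : ((((0:Int),(1:Int),(0:Int)),((1:Int),(1:Int),(1:Int)),((1:Int),(1:Int),(0:Int))) : M3) = Mmat := rfl
    rw [hfd, hMm, matpow_eq_powS]
    have hmain := braidLoop_powS (level.toNat / 2) 0 (1, 1, 1) (by decide) (by omega)
    by_cases hod : PySem.Int.mod level 2 = 0
    · rw [if_neg (not_not_intro hod)]
      have hev : level.toNat = 2 * (level.toNat / 2) := by
        rw [PySem.Int.mod_eq_emod_of_pos (by norm_num)] at hod; omega
      conv_lhs => rw [hev]
      rw [hmain.1, appM_ones]
    · rw [if_pos hod]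
      have hov : level.toNat = 2 * (level.toNat / 2) + 1 := by
        rw [PySem.Int.mod_eq_emod_of_pos (by norm_num)] at hod
        have : 0 < level := by omega
        omega
      conv_lhs => rw [hov]
      rw [hmain.2, appM_ones]
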